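-- pv_equiv track=rewrite | github.com/EnesSakalliUniWien/BranchArchitect | brancharchitect/distances/co_clustering_frequencies.py | filter_minimal_splits
-- ===== SOURCE A (Python) =====
-- from typing import List, Dict, Set
--
-- def filter_minimal_splits(splits: List[Set[int]]) -> List[Set[int]]:
--     """
--     Filters the list of splits to only include minimal unique splits,
--     i.e., splits that are not subsets of any other split in the list.
--
--     Args:
--     - splits (List[Set[int]]): List of splits represented as sets of taxon indices.
--
--     Returns:
--     - List[Set[int]]: Filtered list of minimal unique splits.
--     """
--     filtered_splits = []
--     for split in splits:
--         if not any(
--             split < other_split for other_split in splits if split != other_split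
--         ):
--             filtered_splits.append(split)
--     return filtered_splits
-- ===== SOURCE B (Python) =====
-- def filter_minimal_splits(splits):
--     # Sort once by size (descending); a proper superset of a split must be
--     # strictly larger, so for each split we only scan the prefix of strictly
--     # larger sets and stop at the first set of equal-or-smaller size.
--     by_size = sorted(splits, key=len, reverse=True)
--     filtered = []
--     for split in splits:
--         dominated = False
--         for other in by_size:
--             if len(other) <= len(split):
--                 break
--             if split <= other:
--                 dominated = True
--                 break
--         if not dominated:
--             filtered.append(split)
--     return filtered
-- ===== Notes on version B (the rewrite author's own statement) =====
-- stated objective: alternative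
-- what changed: Instead of testing proper-subset against every other split, B sorts the splits once by size (descending) and, for each split, scans only the prefix of strictly larger sets for a superset, stopping at the first equal-or-smaller set (a proper superset of a set must be strictly larger).
import Mathlib
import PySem

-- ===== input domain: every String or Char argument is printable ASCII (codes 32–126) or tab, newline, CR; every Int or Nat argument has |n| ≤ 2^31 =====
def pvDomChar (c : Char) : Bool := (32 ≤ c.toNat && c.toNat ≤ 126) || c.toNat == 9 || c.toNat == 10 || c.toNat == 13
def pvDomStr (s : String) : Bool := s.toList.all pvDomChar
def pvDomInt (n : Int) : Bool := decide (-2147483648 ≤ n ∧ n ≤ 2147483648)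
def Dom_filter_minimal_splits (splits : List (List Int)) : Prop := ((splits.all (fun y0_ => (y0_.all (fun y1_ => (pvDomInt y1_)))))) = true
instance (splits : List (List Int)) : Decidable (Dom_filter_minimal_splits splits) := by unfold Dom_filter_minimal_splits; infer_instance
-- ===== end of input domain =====

-- B replaces the all-pairs proper-subset test by one size-descending sort plus, per split,
-- an early-terminating scan of the strictly larger sets (objective: alternative).

-- ===== PORT A =====
def filter_minimal_splits (splits : List (List Int)) : List (List Int) :=
  splits.foldl (fun acc split =>
    if !((splits.filter (fun o => !(PySem.Set.equal split o))).any
          (fun o => PySem.Set.issubset split o && !(PySem.Set.equal split o)))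
    then acc ++ [split] else acc) []

-- ===== PORT B =====
-- inner 'for other in by_size: break/…' loop of Source B
def pvAltScan (split : List Int) : List (List Int) → Bool
  | [] => false
  | other :: rest =>
      if other.length ≤ split.length then false
      else if PySem.Set.issubset split other then true
      else pvAltScan split rest

def filter_minimal_splits_alt (splits : List (List Int)) : List (List Int) :=
  let by_size := PySem.List.sorted splits (fun s => (s.length : Int)) true
  splits.foldl (fun acc split =>
    if !(pvAltScan split by_size) then acc ++ [split] else acc) []

-- ===== PRECONDITION & SPEC =====
-- The Python argument is a list of SETS; Pre_ only states the set-representation invariant of the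
-- type convention (each inner list holds distinct elements) — no actual Python input is excluded.
def Pre_filter_minimal_splits (splits : List (List Int)) : Prop := ∀ s ∈ splits, s.Nodup
instance (splits : List (List Int)) : Decidable (Pre_filter_minimal_splits splits) := by unfold Pre_filter_minimal_splits; infer_instance
def pvWitness_filter_minimal_splits : List (List Int) := [[1, 2], [1], [3]]

def Spec_filter_minimal_splits (splits : List (List Int)) (out : List (List Int)) : Prop := out = filter_minimal_splits_alt splits
instance (splits : List (List Int)) (out : List (List Int)) : Decidable (Spec_filter_minimal_splits splits out) := by unfold Spec_filter_minimal_splits; infer_instance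

-- ===== CLAIM (what is proved, stated in full; the proofs are below) =====
def Claim_equal_filter_minimal_splits : Prop := ∀ (splits : List (List Int)), Dom_filter_minimal_splits splits → Pre_filter_minimal_splits splits → Spec_filter_minimal_splits splits (filter_minimal_splits splits)

-- ===== LEMMAS AND PROOFS =====

-- the early-break scan over a size-descending list is the any over the whole list
theorem pvAltScan_eq_any (split : List Int) (l : List (List Int))
    (h : l.Pairwise (fun a b => b.length ≤ a.length)) :
    pvAltScan split l
      = l.any (fun o => decide (split.length < o.length) && PySem.Set.issubset split o) := by
  induction l with
  | nil => rfl
  | cons o rest ih =>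
    rcases List.pairwise_cons.1 h with ⟨ho, hrest⟩
    by_cases hle : o.length ≤ split.length
    · have htail : ∀ x ∈ rest,
        (decide (split.length < x.length) && PySem.Set.issubset split x) = false := by
        intro x hx
        have : x.length ≤ split.length := le_trans (ho x hx) hle
        simp [Nat.not_lt.2 this]
      simp only [pvAltScan, if_pos hle, List.any_cons]
      rw [List.any_eq_false.2 (fun x hx => by simp [htail x hx])]
      simp [Nat.not_lt.2 hle]
    · have hlt : split.length < o.length := Nat.lt_of_not_le hle
      by_cases hsub : PySem.Set.issubset split o = true
      · simp [pvAltScan, hle, hsub, hlt]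
      · simp [pvAltScan, hle, hsub, hlt, ih hrest]

-- for duplicate-free lists, 'proper subset' is 'subset and strictly smaller'
theorem proper_iff_smaller (s o : List Int) (hs : s.Nodup) (ho : o.Nodup) :
    (!(PySem.Set.equal s o) && (PySem.Set.issubset s o && !(PySem.Set.equal s o)))
      = (decide (s.length < o.length) && PySem.Set.issubset s o) := by
  by_cases hsub : PySem.Set.issubset s o = true
  · have hsubs : s ⊆ o := by
      intro x hx; exact ((PySem.Set.issubset_iff s o).1 hsub) x hx
    have hsp : List.Subperm s o := hs.subperm hsubs
    rw [hsub]
    by_cases heq : PySem.Set.equal s o = true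
    · have hmem : ∀ x, x ∈ s ↔ x ∈ o := (PySem.Set.equal_iff s o).1 heq
      have hos : o ⊆ s := fun x hx => (hmem x).2 hx
      have : o.length ≤ s.length := (ho.subperm hos).length_le
      simp [heq, Nat.not_lt.2 this]
    · have hne : s.length ≠ o.length := by
        intro hlen
        have hperm : s.Perm o := hsp.perm_of_length_le (le_of_eq hlen.symm)
        exact heq ((PySem.Set.equal_iff s o).2 fun x => hperm.mem_iff)
      have : s.length < o.length := lt_of_le_of_ne hsp.length_le hne
      simp [heq, this]
  · simp [Bool.eq_false_iff.2 hsub]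

-- both per-split conditions are the same any over the input list
theorem cond_eq (splits : List (List Int)) (hpre : ∀ s ∈ splits, s.Nodup)
    (split : List Int) (hmem : split ∈ splits) :
    ((splits.filter (fun o => !(PySem.Set.equal split o))).any
        (fun o => PySem.Set.issubset split o && !(PySem.Set.equal split o)))
      = pvAltScan split (PySem.List.sorted splits (fun s => (s.length : Int)) true) := by
  have hpair : (PySem.List.sorted splits (fun s => (s.length : Int)) true).Pairwise
      (fun a b : List Int => b.length ≤ a.length) := by
    have := PySem.List.sorted_pairwise_rev (xs := splits) (key := fun s : List Int => (s.length : Int))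
    exact this.imp (fun h => by exact_mod_cast h)
  rw [pvAltScan_eq_any _ _ hpair]
  rw [Bool.eq_iff_iff]
  simp only [List.any_eq_true, List.mem_filter, PySem.List.mem_sorted]
  constructor
  · rintro ⟨o, ⟨ho, hne⟩, hcond⟩
    refine ⟨o, ho, ?_⟩
    rw [← proper_iff_smaller split o (hpre _ hmem) (hpre _ ho)]
    simp_all
  · rintro ⟨o, ho, hcond⟩
    rw [← proper_iff_smaller split o (hpre _ hmem) (hpre _ ho)] at hcond
    exact ⟨o, ⟨ho, by simp_all⟩, by simp_all⟩

-- ===== VERDICT (by name: the statement is the Claim_ definition above) =====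
theorem filter_minimal_splits_spec : Claim_equal_filter_minimal_splits := by
  intro splits _ hpre
  unfold Spec_filter_minimal_splits filter_minimal_splits filter_minimal_splits_alt
  show List.foldl _ [] splits = List.foldl _ [] splits
  apply PySem.List.foldl_congr_mem
  intro acc split hmem
  rw [cond_eq splits hpre split hmem]
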